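-- pv_equiv track=rewrite | github.com/SJ-1011/BOJ | 백준/Bronze/8958. OX퀴즈/OX퀴즈.py | solution
-- ===== SOURCE A (Python) =====
-- def solution(v):
--     ansList = []
--
--     for i in v:
--         num = 0
--         ans = 0
--         for j in i:
--             if j == 'O':
--                 num += 1
--                 ans += num
--             else:
--                 num = 0
--         ansList.append(ans)
--
--     return ansList
-- ===== SOURCE B (Python) =====
-- def solution(v):
--     def runs(s):
--         out = []
--         k = 0
--         for c in s:
--             if c == 'O':
--                 k += 1
--             else:
--                 if k:
--                     out.append(k)
--                 k = 0
--         if k: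
--             out.append(k)
--         return out
--
--     return [sum(k * (k + 1) // 2 for k in runs(s)) for s in v]
-- ===== Notes on version B (the rewrite author's own statement) =====
-- stated objective: alternative
-- what changed: B first extracts the list of maximal runs of 'O' per string and sums the closed-form triangular number k*(k+1)//2 per run, instead of A's per-character running counter added into the score; it trades the incremental accumulator for run-lengths plus a closed form at the same cost.
import Mathlib
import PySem

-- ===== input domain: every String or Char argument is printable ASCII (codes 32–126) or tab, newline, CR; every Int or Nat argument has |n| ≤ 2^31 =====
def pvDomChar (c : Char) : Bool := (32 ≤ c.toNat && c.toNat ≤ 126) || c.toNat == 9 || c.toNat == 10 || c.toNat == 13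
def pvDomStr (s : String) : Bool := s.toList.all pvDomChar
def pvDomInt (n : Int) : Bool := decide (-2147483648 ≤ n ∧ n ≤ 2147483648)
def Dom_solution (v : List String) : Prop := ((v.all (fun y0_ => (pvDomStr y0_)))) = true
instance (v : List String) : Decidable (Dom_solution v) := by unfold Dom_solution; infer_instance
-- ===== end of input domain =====

-- B replaces the per-character running-counter accumulation with run extraction plus a
-- closed-form triangular sum per run (alternative decomposition, same cost).

-- ===== PORT A =====
def solution (v : List String) : List Int :=
  v.foldl (fun ansList i =>
    ansList ++ [(i.toList.foldl
      (fun (st : Int × Int) j =>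
        if j = 'O' then (st.1 + 1, st.2 + (st.1 + 1)) else (0, st.2))
      ((0 : Int), (0 : Int))).2]) []

-- ===== PORT B =====
-- B: extract maximal runs of 'O', then sum the closed-form triangular number per run.
def altRuns : List Char → Int → List Int
  | [], k => if k ≠ 0 then [k] else []
  | c :: cs, k =>
      if c = 'O' then altRuns cs (k + 1)
      else (if k ≠ 0 then [k] else []) ++ altRuns cs 0

def solution_alt (v : List String) : List Int :=
  v.map (fun s =>
    (altRuns s.toList 0).foldl (fun a k => a + PySem.Int.floordiv (k * (k + 1)) 2) 0)

-- ===== PRECONDITION & SPEC =====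
def Spec_solution (v : List String) (out : List Int) : Prop := out = solution_alt v
instance (v : List String) (out : List Int) : Decidable (Spec_solution v out) := by unfold Spec_solution; infer_instance

-- ===== CLAIM (what is proved, stated in full; the proofs are below) =====
def Claim_equal_solution : Prop := ∀ (v : List String), Dom_solution v → Spec_solution v (solution v)

-- ===== LEMMAS AND PROOFS =====
def tri (n : Int) : Int := PySem.Int.floordiv (n * (n + 1)) 2

theorem tri_succ (n : Int) : tri (n + 1) = tri n + (n + 1) := by
  unfold tri
  rw [PySem.Int.floordiv_eq_ediv_of_pos (by omega), PySem.Int.floordiv_eq_ediv_of_pos (by omega)]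
  have h : (n + 1) * (n + 1 + 1) = n * (n + 1) + (n + 1) * 2 := by ring
  rw [h, Int.add_mul_ediv_right _ _ (by omega : (2:Int) ≠ 0)]

theorem tri_zero : tri 0 = 0 := by decide

theorem foldl_tri (rs : List Int) (a : Int) :
    rs.foldl (fun a k => a + PySem.Int.floordiv (k * (k + 1)) 2) a
      = a + (rs.map tri).sum := by
  induction rs generalizing a with
  | nil => simp
  | cons r rs ih =>
      rw [List.foldl_cons, ih, List.map_cons, List.sum_cons]
      unfold tri
      ring

theorem inner_eq (l : List Char) (num ans : Int) :
    (l.foldl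
      (fun (st : Int × Int) j =>
        if j = 'O' then (st.1 + 1, st.2 + (st.1 + 1)) else (0, st.2))
      (num, ans)).2
      = ans + ((altRuns l num).map tri).sum - tri num := by
  induction l generalizing num ans with
  | nil =>
      by_cases h : num = 0
      · simp [altRuns, h, tri_zero]
      · simp [altRuns, h]
  | cons c cs ih =>
      rw [List.foldl_cons]
      by_cases hc : c = 'O'
      · subst hc
        have hstep : (if ('O' : Char) = 'O'
              then ((num, ans).1 + 1, (num, ans).2 + ((num, ans).1 + 1))
              else ((0 : Int), (num, ans).2))
            = (num + 1, ans + (num + 1)) := by simp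
        have hr : altRuns ('O' :: cs) num = altRuns cs (num + 1) := by simp [altRuns]
        rw [hstep, ih, hr, tri_succ]
        ring
      · have hstep : (if c = 'O'
              then ((num, ans).1 + 1, (num, ans).2 + ((num, ans).1 + 1))
              else ((0 : Int), (num, ans).2))
            = (0, ans) := by simp [hc]
        have hr : altRuns (c :: cs) num
            = (if num ≠ 0 then [num] else []) ++ altRuns cs 0 := by simp [altRuns, hc]
        rw [hstep, ih, hr, List.map_append, List.sum_append]
        by_cases h : num = 0
        · simp [h, tri_zero]
        · simp [h, tri_zero]
          ring

theorem append_snoc_map {f : String → Int} (v : List String) (acc : List Int) :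
    v.foldl (fun ansList i => ansList ++ [f i]) acc = acc ++ v.map f := by
  induction v generalizing acc with
  | nil => simp
  | cons s v ih => simp [List.foldl, ih]

-- ===== VERDICT (by name: the statement is the Claim_ definition above) =====
theorem solution_spec : Claim_equal_solution := by
  intro v _
  unfold Spec_solution solution solution_alt
  rw [append_snoc_map]
  simp only [List.nil_append]
  apply List.map_congr_left
  intro s _
  rw [inner_eq, foldl_tri, tri_zero]
  ring
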